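-- pv_equiv track=rewrite | github.com/mozylee/algorithm | boj/prob03663.py | get_movement
-- ===== SOURCE A (Python) =====
-- from collections import deque
--
-- alphabet = {chr(i+65): (i, 26-i) for i in range(26)}
--
-- def get_movement(s: str) -> int:
--     dq = deque(s)
--     while dq and dq[-1] == 'A':
--         dq.pop()
--
--     ret = 0
--     while dq:
--         ret += min(alphabet[dq.popleft()])+1
--     return ret
-- ===== SOURCE B (Python) =====
-- alphabet = {chr(i+65): (i, 26-i) for i in range(26)}
--
-- def get_movement(s: str) -> int:
--     ret = 0
--     pending = 0
--     for c in s: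
--         if c != 'A':
--             ret += pending
--             pending = 0
--             ret += min(alphabet[c]) + 1
--         else:
--             pending += min(alphabet[c]) + 1
--     return ret
-- ===== Notes on version B (the rewrite author's own statement) =====
-- stated objective: alternative
-- what changed: Replaces the two-phase deque algorithm (pop trailing 'A's from the back, then sum costs over the remainder) with a single forward pass that buffers costs of 'A'-runs in a pending accumulator, flushing it only when a later non-'A' character appears, so trailing 'A' costs are silently discarded.
import Mathlib
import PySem

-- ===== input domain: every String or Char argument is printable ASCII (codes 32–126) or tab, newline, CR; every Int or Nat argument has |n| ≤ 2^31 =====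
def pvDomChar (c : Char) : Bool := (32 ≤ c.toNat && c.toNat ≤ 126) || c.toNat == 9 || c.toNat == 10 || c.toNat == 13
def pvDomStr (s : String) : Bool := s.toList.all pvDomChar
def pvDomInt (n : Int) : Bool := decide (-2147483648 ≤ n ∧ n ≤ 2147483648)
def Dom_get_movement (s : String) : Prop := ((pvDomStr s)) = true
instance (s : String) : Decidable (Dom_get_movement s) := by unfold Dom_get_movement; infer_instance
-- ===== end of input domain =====

-- B is an alternative single forward pass: it buffers costs of 'A'-runs in a pending
-- accumulator and flushes them only when a later non-'A' appears, instead of A's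
-- two-phase pop-trailing-'A's-then-sum deque scan. Same O(n) cost, different traversal.

-- cost of one letter: min(alphabet[c]) + 1, with alphabet[c] = (i, 26-i), i = ord(c)-65
def pvCost (c : Char) : Int := min ((c.toNat : Int) - 65) (26 - ((c.toNat : Int) - 65)) + 1

-- ===== PORT A =====
-- the `while dq and dq[-1] == 'A': dq.pop()` loop, acting on the reversed list
def pvPopA : List Char → List Char
  | [] => []
  | c :: t => if c = 'A' then pvPopA t else c :: t

def get_movement (s : String) : Int :=
  let dq := (pvPopA s.toList.reverse).reverse
  dq.foldl (fun r c => r + pvCost c) 0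

-- ===== PORT B =====
def get_movement_alt (s : String) : Int :=
  (s.toList.foldl
    (fun (st : Int × Int) c =>
      if c ≠ 'A' then (st.1 + st.2 + pvCost c, 0) else (st.1, st.2 + pvCost c))
    (0, 0)).1

-- ===== PRECONDITION & SPEC =====
-- Pre_ excludes exactly the strings containing a character outside 'A'..'Z':
-- there both Pythons raise KeyError on the alphabet lookup.
def Pre_get_movement (s : String) : Prop := (s.toList.all (fun c => 65 ≤ c.toNat && c.toNat ≤ 90)) = true
instance (s : String) : Decidable (Pre_get_movement s) := by unfold Pre_get_movement; infer_instance
def pvWitness_get_movement : String := "B"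

def Spec_get_movement (s : String) (out : Int) : Prop := out = get_movement_alt s
instance (s : String) (out : Int) : Decidable (Spec_get_movement s out) := by unfold Spec_get_movement; infer_instance

-- ===== CLAIM (what is proved, stated in full; the proofs are below) =====
def Claim_equal_get_movement : Prop := ∀ (s : String), Dom_get_movement s → Pre_get_movement s → Spec_get_movement s (get_movement s)

-- ===== LEMMAS AND PROOFS =====

def pvSumC (l : List Char) : Int := (l.map pvCost).sum

theorem pvFoldl_cost (l : List Char) (r : Int) :
    l.foldl (fun r c => r + pvCost c) r = r + pvSumC l := by
  induction l generalizing r with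
  | nil => simp [pvSumC]
  | cons c t ih => simp [List.foldl, ih, pvSumC]; ring

theorem pvPopA_append (xs : List Char) (c : Char) :
    pvPopA (xs ++ [c]) =
      if pvPopA xs = [] then (if c = 'A' then [] else [c]) else pvPopA xs ++ [c] := by
  induction xs with
  | nil => simp [pvPopA]
  | cons x t ih =>
    by_cases hx : x = 'A'
    · simpa [pvPopA, hx] using ih
    · simp [pvPopA, hx]

theorem pvKey (l : List Char) (r p : Int) :
    (l.foldl
      (fun (st : Int × Int) c =>
        if c ≠ 'A' then (st.1 + st.2 + pvCost c, 0) else (st.1, st.2 + pvCost c))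
      (r, p)).1 =
    r + (if pvPopA l.reverse = [] then 0 else p + pvSumC ((pvPopA l.reverse).reverse)) := by
  induction l generalizing r p with
  | nil => simp [pvPopA]
  | cons c t ih =>
    have hrev : (c :: t).reverse = t.reverse ++ [c] := by simp
    rw [hrev, pvPopA_append]
    by_cases hc : c = 'A'
    · subst hc
      simp only [List.foldl, ne_eq, not_true_eq_false, if_false, if_true]
      rw [ih]
      by_cases h0 : pvPopA t.reverse = []
      · simp [h0]
      · simp only [h0, if_false, if_neg (by simp [h0] : ¬(pvPopA t.reverse ++ ['A'] = []))]
        simp [pvSumC]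
        have : pvCost 'A' = 1 := by decide
        simp [this]; ring
    · simp only [List.foldl, ne_eq, hc, not_false_eq_true, if_true]
      rw [ih]
      by_cases h0 : pvPopA t.reverse = []
      · simp [h0, pvSumC]; ring
      · simp only [h0, if_false, if_neg (by simp [h0] : ¬(pvPopA t.reverse ++ [c] = []))]
        simp [pvSumC]; ring

-- ===== VERDICT (by name: the statement is the Claim_ definition above) =====
theorem get_movement_spec : Claim_equal_get_movement := by
  intro s _ _
  unfold Spec_get_movement get_movement get_movement_alt
  rw [pvKey, pvFoldl_cost]
  by_cases h0 : pvPopA s.toList.reverse = [] <;> simp [h0, pvSumC]
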